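-- pv_equiv track=rewrite | github.com/gabrielemongirdaite/advent_of_code_2025 | day9.py | find_distances_part2
-- ===== SOURCE A (Python) =====
-- import itertools
--
-- def find_distances_part2(f, s, t, fo, t_all, fo_all):
--     comb1 = itertools.product(f, t)
--     comb2 = itertools.product(s, fo)
--     max_area = 0
--     for i in comb1:
--         c1 = (i[0][0], i[1][1])
--         all_relevant_tmp = []
--         for i1 in t_all:
--             if i1[0] == c1[0] and i1[1] != c1[1]:
--                 all_relevant_tmp.append(i1[1])
--         if all_relevant_tmp:
--             if c1[1] <= min(all_relevant_tmp):
--                 x = abs(i[0][0] - i[1][0]) + 1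
--                 y = abs(i[0][1] - i[1][1]) + 1
--                 area = x * y
--                 if max_area < area:
--                     max_area = area
--     for i in comb2:
--         c1 = (i[0][0], i[1][1])
--         all_relevant_tmp = []
--         for i1 in fo_all:
--             if i1[0] == c1[0] and i1[1] != c1[1]:
--                 all_relevant_tmp.append(i1[1])
--         if all_relevant_tmp:
--             if c1[1] >= max(all_relevant_tmp):
--                 x = abs(i[0][0] - i[1][0]) + 1
--                 y = abs(i[0][1] - i[1][1]) + 1
--                 area = x * y
--                 if max_area < area:
--                     max_area = area
--     return max_area
-- ===== SOURCE B (Python) =====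
-- def find_distances_part2(f, s, t, fo, t_all, fo_all):
--     # Precompute, per x, the two smallest (resp. largest) distinct y values.
--     two_smallest = {}
--     for x, y in t_all:
--         e = two_smallest.get(x)
--         if e is None:
--             two_smallest[x] = (y, None)
--         else:
--             m1, m2 = e
--             if y < m1:
--                 two_smallest[x] = (y, m1)
--             elif y > m1 and (m2 is None or y < m2):
--                 two_smallest[x] = (m1, y)
--     two_largest = {}
--     for x, y in fo_all:
--         e = two_largest.get(x)
--         if e is None:
--             two_largest[x] = (y, None)
--         else:
--             m1, m2 = e
--             if y > m1:
--                 two_largest[x] = (y, m1)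
--             elif y < m1 and (m2 is None or y > m2):
--                 two_largest[x] = (m1, y)
--     best = 0
--     for ax, ay in f:
--         for bx, by in t:
--             e = two_smallest.get(ax)
--             if e is not None:
--                 m1, m2 = e
--                 if by < m1 or (by == m1 and m2 is not None):
--                     area = (abs(ax - bx) + 1) * (abs(ay - by) + 1)
--                     if area > best:
--                         best = area
--     for ax, ay in s:
--         for bx, by in fo:
--             e = two_largest.get(ax)
--             if e is not None:
--                 m1, m2 = e
--                 if by > m1 or (by == m1 and m2 is not None):
--                     area = (abs(ax - bx) + 1) * (abs(ay - by) + 1)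
--                     if area > best:
--                         best = area
--     return best
-- ===== Notes on version B (the rewrite author's own statement) =====
-- stated objective: faster
-- what changed: Instead of rescanning all of t_all (resp. fo_all) for every (f,t) (resp. (s,fo)) pair, B precomputes once per x the two smallest (resp. largest) distinct y values in a dict, making each pair's constraint check O(1).
import Mathlib
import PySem

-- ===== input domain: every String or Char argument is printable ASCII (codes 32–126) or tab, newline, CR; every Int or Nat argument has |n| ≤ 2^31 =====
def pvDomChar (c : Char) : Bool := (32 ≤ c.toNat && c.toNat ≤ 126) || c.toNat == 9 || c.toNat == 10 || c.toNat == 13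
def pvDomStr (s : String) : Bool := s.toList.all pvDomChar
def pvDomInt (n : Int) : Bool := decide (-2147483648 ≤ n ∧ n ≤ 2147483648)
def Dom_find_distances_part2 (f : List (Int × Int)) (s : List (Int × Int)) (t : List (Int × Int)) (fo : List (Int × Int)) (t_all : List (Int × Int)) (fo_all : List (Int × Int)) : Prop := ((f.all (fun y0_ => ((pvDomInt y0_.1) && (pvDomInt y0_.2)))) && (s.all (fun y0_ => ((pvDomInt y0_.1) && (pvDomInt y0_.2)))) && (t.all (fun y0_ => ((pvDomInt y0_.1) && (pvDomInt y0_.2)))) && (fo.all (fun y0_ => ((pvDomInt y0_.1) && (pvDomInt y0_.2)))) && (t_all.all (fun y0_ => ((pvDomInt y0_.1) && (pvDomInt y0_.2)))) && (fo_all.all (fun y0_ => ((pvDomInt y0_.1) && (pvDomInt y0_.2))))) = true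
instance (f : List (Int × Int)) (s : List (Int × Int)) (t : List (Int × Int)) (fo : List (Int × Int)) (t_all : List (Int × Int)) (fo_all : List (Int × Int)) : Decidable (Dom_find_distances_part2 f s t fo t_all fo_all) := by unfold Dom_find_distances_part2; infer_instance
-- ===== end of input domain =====

-- B replaces A's per-pair rescans of t_all/fo_all by one dict precomputed per x (two smallest / two largest distinct y), for an asymptotic speed-up; return values are proved equal on all inputs.

-- ===== PORT A =====
-- literal transliteration of Source A: itertools.product → flatMap/map, the inner
-- append loop → foldl over t_all/fo_all; min()/max() on the (guarded nonempty)
-- list → PySem.List.min?/max? with getD 0 (unreachable default under the guard)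
def find_distances_part2 (f : List (Int × Int)) (s : List (Int × Int)) (t : List (Int × Int)) (fo : List (Int × Int)) (t_all : List (Int × Int)) (fo_all : List (Int × Int)) : Int :=
  let comb1 := f.flatMap (fun a => t.map (fun b => (a, b)))
  let comb2 := s.flatMap (fun a => fo.map (fun b => (a, b)))
  let max_area1 := comb1.foldl (fun max_area i =>
    let c1 := (i.1.1, i.2.2)
    let all_relevant_tmp := t_all.foldl (fun acc i1 =>
      if i1.1 = c1.1 ∧ i1.2 ≠ c1.2 then acc ++ [i1.2] else acc) ([] : List Int)
    if all_relevant_tmp ≠ [] then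
      if c1.2 ≤ (PySem.List.min? all_relevant_tmp (fun y => y)).getD 0 then
        let x := |i.1.1 - i.2.1| + 1
        let y := |i.1.2 - i.2.2| + 1
        let area := x * y
        if max_area < area then area else max_area
      else max_area
    else max_area) 0
  comb2.foldl (fun max_area i =>
    let c1 := (i.1.1, i.2.2)
    let all_relevant_tmp := fo_all.foldl (fun acc i1 =>
      if i1.1 = c1.1 ∧ i1.2 ≠ c1.2 then acc ++ [i1.2] else acc) ([] : List Int)
    if all_relevant_tmp ≠ [] then
      if (PySem.List.max? all_relevant_tmp (fun y => y)).getD 0 ≤ c1.2 then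
        let x := |i.1.1 - i.2.1| + 1
        let y := |i.1.2 - i.2.2| + 1
        let area := x * y
        if max_area < area then area else max_area
      else max_area
    else max_area) max_area1

-- ===== PORT B =====
-- helpers mirroring Source B: dict update steps and the O(1) constraint check
def pvLtOpt (y : Int) (m2 : Option Int) : Bool :=
  match m2 with | none => true | some w => decide (y < w)

def pvGtOpt (y : Int) (m2 : Option Int) : Bool :=
  match m2 with | none => true | some w => decide (w < y)

def pvStepMin (d : PySem.Dict Int (Int × Option Int)) (p : Int × Int) : PySem.Dict Int (Int × Option Int) :=
  match d.get? p.1 with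
  | none => d.insert p.1 (p.2, none)
  | some (m1, m2) =>
    if p.2 < m1 then d.insert p.1 (p.2, some m1)
    else if m1 < p.2 ∧ pvLtOpt p.2 m2 = true then d.insert p.1 (m1, some p.2)
    else d

def pvStepMax (d : PySem.Dict Int (Int × Option Int)) (p : Int × Int) : PySem.Dict Int (Int × Option Int) :=
  match d.get? p.1 with
  | none => d.insert p.1 (p.2, none)
  | some (m1, m2) =>
    if m1 < p.2 then d.insert p.1 (p.2, some m1)
    else if p.2 < m1 ∧ pvGtOpt p.2 m2 = true then d.insert p.1 (m1, some p.2)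
    else d

def pvOkMin (e : Option (Int × Option Int)) (v : Int) : Bool :=
  match e with
  | none => false
  | some (m1, m2) => decide (v < m1) || (decide (v = m1) && m2.isSome)

def pvOkMax (e : Option (Int × Option Int)) (v : Int) : Bool :=
  match e with
  | none => false
  | some (m1, m2) => decide (m1 < v) || (decide (v = m1) && m2.isSome)

def find_distances_part2_alt (f : List (Int × Int)) (s : List (Int × Int)) (t : List (Int × Int)) (fo : List (Int × Int)) (t_all : List (Int × Int)) (fo_all : List (Int × Int)) : Int :=
  let two_smallest := t_all.foldl pvStepMin PySem.Dict.empty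
  let two_largest := fo_all.foldl pvStepMax PySem.Dict.empty
  let best1 := f.foldl (fun best a => t.foldl (fun best b =>
    if pvOkMin (two_smallest.get? a.1) b.2 then
      let area := (|a.1 - b.1| + 1) * (|a.2 - b.2| + 1)
      if best < area then area else best
    else best) best) 0
  s.foldl (fun best a => fo.foldl (fun best b =>
    if pvOkMax (two_largest.get? a.1) b.2 then
      let area := (|a.1 - b.1| + 1) * (|a.2 - b.2| + 1)
      if best < area then area else best
    else best) best) best1

-- ===== PRECONDITION & SPEC =====
def Spec_find_distances_part2 (f : List (Int × Int)) (s : List (Int × Int)) (t : List (Int × Int)) (fo : List (Int × Int)) (t_all : List (Int × Int)) (fo_all : List (Int × Int)) (out : Int) : Prop := out = find_distances_part2_alt f s t fo t_all fo_all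
instance (f : List (Int × Int)) (s : List (Int × Int)) (t : List (Int × Int)) (fo : List (Int × Int)) (t_all : List (Int × Int)) (fo_all : List (Int × Int)) (out : Int) : Decidable (Spec_find_distances_part2 f s t fo t_all fo_all out) := by unfold Spec_find_distances_part2; infer_instance

-- ===== CLAIM (what is proved, stated in full; the proofs are below) =====
def Claim_equal_find_distances_part2 : Prop := ∀ (f : List (Int × Int)) (s : List (Int × Int)) (t : List (Int × Int)) (fo : List (Int × Int)) (t_all : List (Int × Int)) (fo_all : List (Int × Int)), Dom_find_distances_part2 f s t fo t_all fo_all → Spec_find_distances_part2 f s t fo t_all fo_all (find_distances_part2 f s t fo t_all fo_all)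

-- ===== LEMMAS AND PROOFS =====

-- value computed by one pvStepMin/pvStepMax update, seen at a single key
def pvUpdMin (e : Option (Int × Option Int)) (y : Int) : Int × Option Int :=
  match e with
  | none => (y, none)
  | some (m1, m2) =>
    if y < m1 then (y, some m1)
    else if m1 < y ∧ pvLtOpt y m2 = true then (m1, some y) else (m1, m2)

def pvUpdMax (e : Option (Int × Option Int)) (y : Int) : Int × Option Int :=
  match e with
  | none => (y, none)
  | some (m1, m2) =>
    if m1 < y then (y, some m1)
    else if y < m1 ∧ pvGtOpt y m2 = true then (m1, some y) else (m1, m2)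

def pvFoldMin (ys : List Int) : Option (Int × Option Int) :=
  ys.foldl (fun e y => some (pvUpdMin e y)) none

def pvFoldMax (ys : List Int) : Option (Int × Option Int) :=
  ys.foldl (fun e y => some (pvUpdMax e y)) none

lemma foldl_flatMap_pairs {α β γ : Type} (g : γ → α × β → γ) (l : List α) (m : List β) (a : γ) :
    (l.flatMap (fun p => m.map (fun q => (p, q)))).foldl g a
      = l.foldl (fun a p => m.foldl (fun a q => g a (p, q)) a) a := by
  induction l generalizing a with
  | nil => rfl
  | cons p l ih => simp [List.foldl_append, List.foldl_map, ih]

lemma get?_foldl_stepMin (l : List (Int × Int)) (d : PySem.Dict Int (Int × Option Int)) (x : Int) :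
    (l.foldl pvStepMin d).get? x
      = ((l.filter (fun q => decide (q.1 = x))).map (·.2)).foldl
          (fun e y => some (pvUpdMin e y)) (d.get? x) := by
  induction l generalizing d with
  | nil => simp
  | cons p l ih =>
    have hkey : (pvStepMin d p).get? x =
        if p.1 = x then some (pvUpdMin (d.get? x) p.2) else d.get? x := by
      by_cases hx : p.1 = x
      · subst hx
        rw [if_pos rfl]
        unfold pvStepMin pvUpdMin
        cases h : d.get? p.1 with
        | none => simp [PySem.Dict.get?_insert]
        | some e =>
          obtain ⟨m1, m2⟩ := e
          dsimp only
          split_ifs with h1 h2 <;> simp [PySem.Dict.get?_insert, h]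
      · have hx2 : ¬ (x = p.1) := fun hh => hx hh.symm
        rw [if_neg hx]
        unfold pvStepMin
        cases h : d.get? p.1 with
        | none => simp [PySem.Dict.get?_insert, hx2]
        | some e =>
          obtain ⟨m1, m2⟩ := e
          dsimp only
          split_ifs with h1 h2 <;> simp [PySem.Dict.get?_insert, hx2]
    rw [List.foldl_cons, ih, hkey]
    by_cases hx : p.1 = x
    · simp [List.filter_cons, hx]
    · simp [List.filter_cons, hx]

lemma get?_foldl_stepMax (l : List (Int × Int)) (d : PySem.Dict Int (Int × Option Int)) (x : Int) :
    (l.foldl pvStepMax d).get? x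
      = ((l.filter (fun q => decide (q.1 = x))).map (·.2)).foldl
          (fun e y => some (pvUpdMax e y)) (d.get? x) := by
  induction l generalizing d with
  | nil => simp
  | cons p l ih =>
    have hkey : (pvStepMax d p).get? x =
        if p.1 = x then some (pvUpdMax (d.get? x) p.2) else d.get? x := by
      by_cases hx : p.1 = x
      · subst hx
        rw [if_pos rfl]
        unfold pvStepMax pvUpdMax
        cases h : d.get? p.1 with
        | none => simp [PySem.Dict.get?_insert]
        | some e =>
          obtain ⟨m1, m2⟩ := e
          dsimp only
          split_ifs with h1 h2 <;> simp [PySem.Dict.get?_insert, h]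
      · have hx2 : ¬ (x = p.1) := fun hh => hx hh.symm
        rw [if_neg hx]
        unfold pvStepMax
        cases h : d.get? p.1 with
        | none => simp [PySem.Dict.get?_insert, hx2]
        | some e =>
          obtain ⟨m1, m2⟩ := e
          dsimp only
          split_ifs with h1 h2 <;> simp [PySem.Dict.get?_insert, hx2]
    rw [List.foldl_cons, ih, hkey]
    by_cases hx : p.1 = x
    · simp [List.filter_cons, hx]
    · simp [List.filter_cons, hx]

lemma pvFoldMin_spec (ys : List Int) :
    (pvFoldMin ys = none → ys = []) ∧
    (∀ m1 m2o, pvFoldMin ys = some (m1, m2o) →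
       m1 ∈ ys ∧ (∀ y ∈ ys, m1 ≤ y) ∧
       (m2o = none → ∀ y ∈ ys, y = m1) ∧
       (∀ m2, m2o = some m2 → m2 ∈ ys ∧ m1 < m2 ∧ ∀ y ∈ ys, y ≠ m1 → m2 ≤ y)) := by
  induction ys using List.reverseRecOn with
  | nil => simp [pvFoldMin]
  | append_singleton zs y ih =>
    have hstep : pvFoldMin (zs ++ [y]) = some (pvUpdMin (pvFoldMin zs) y) := by
      simp [pvFoldMin, List.foldl_append]
    constructor
    · rw [hstep]; intro h; exact absurd h (by simp)
    intro m1 m2o h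
    rw [hstep] at h
    cases hz : pvFoldMin zs with
    | none =>
      have hzs : zs = [] := ih.1 hz
      subst hzs
      rw [hz] at h
      unfold pvUpdMin at h
      obtain ⟨rfl, rfl⟩ : y = m1 ∧ (none : Option Int) = m2o := by
        simpa [Prod.ext_iff] using h
      refine ⟨by simp, by simp, by simp, by simp⟩
    | some e =>
      obtain ⟨n1, n2⟩ := e
      obtain ⟨hmem, hmin, hallnone, hallsome⟩ := ih.2 n1 n2 hz
      rw [hz] at h
      unfold pvUpdMin at h
      dsimp only at h
      split_ifs at h with h1 h2
      · -- y < n1 : result (y, some n1)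
        obtain ⟨rfl, rfl⟩ : y = m1 ∧ (some n1 : Option Int) = m2o := by
          simpa [Prod.ext_iff] using h
        refine ⟨by simp, ?_, by simp, ?_⟩
        · intro z hz'
          rcases List.mem_append.mp hz' with hz' | hz'
          · exact le_trans (le_of_lt h1) (hmin z hz')
          · simp at hz'; omega
        · intro m2 hm2
          obtain rfl : n1 = m2 := by simpa using hm2
          refine ⟨by simp [hmem], h1, ?_⟩
          intro z hz' hne
          rcases List.mem_append.mp hz' with hz' | hz'
          · exact hmin z hz'
          · simp at hz'; omega
      · -- n1 < y and y below current second: result (n1, some y)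
        obtain ⟨h1', hlt⟩ := h2
        obtain ⟨rfl, rfl⟩ : n1 = m1 ∧ (some y : Option Int) = m2o := by
          simpa [Prod.ext_iff] using h
        refine ⟨by simp [hmem], ?_, by simp, ?_⟩
        · intro z hz'
          rcases List.mem_append.mp hz' with hz' | hz'
          · exact hmin z hz'
          · simp at hz'; omega
        · intro m2 hm2
          obtain rfl : y = m2 := by simpa using hm2
          refine ⟨by simp, h1', ?_⟩
          intro z hz' hne
          rcases List.mem_append.mp hz' with hz' | hz'
          · cases hn2 : n2 with
            | none => exact absurd (hallnone hn2 z hz') hne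
            | some w =>
              have hyw : y < w := by simpa [pvLtOpt, hn2] using hlt
              have := (hallsome w hn2).2.2 z hz' hne
              omega
          · simp at hz'; omega
      · -- no change: result (n1, n2)
        obtain ⟨rfl, rfl⟩ : n1 = m1 ∧ n2 = m2o := by
          simpa [Prod.ext_iff] using h
        refine ⟨by simp [hmem], ?_, ?_, ?_⟩
        · intro z hz'
          rcases List.mem_append.mp hz' with hz' | hz'
          · exact hmin z hz'
          · simp at hz'; omega
        · intro hn z hz'
          rcases List.mem_append.mp hz' with hz' | hz'
          · exact hallnone hn z hz'
          · subst hn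
            have : ¬ (n1 < y ∧ pvLtOpt y none = true) := h2
            simp [pvLtOpt] at this
            simp at hz'; omega
        · intro m2 hm2
          obtain ⟨hm2mem, hm2gt, hm2min⟩ := hallsome m2 hm2
          refine ⟨by simp [hm2mem], hm2gt, ?_⟩
          intro z hz' hne
          rcases List.mem_append.mp hz' with hz' | hz'
          · exact hm2min z hz' hne
          · simp at hz'; subst hz'
            subst hm2
            have hny : n1 < z := by omega
            have : ¬ pvLtOpt z (some m2) = true := by
              intro hc; exact h2 ⟨hny, hc⟩
            simp [pvLtOpt] at this
            omega

lemma pvFoldMax_spec (ys : List Int) :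
    (pvFoldMax ys = none → ys = []) ∧
    (∀ m1 m2o, pvFoldMax ys = some (m1, m2o) →
       m1 ∈ ys ∧ (∀ y ∈ ys, y ≤ m1) ∧
       (m2o = none → ∀ y ∈ ys, y = m1) ∧
       (∀ m2, m2o = some m2 → m2 ∈ ys ∧ m2 < m1 ∧ ∀ y ∈ ys, y ≠ m1 → y ≤ m2)) := by
  induction ys using List.reverseRecOn with
  | nil => simp [pvFoldMax]
  | append_singleton zs y ih =>
    have hstep : pvFoldMax (zs ++ [y]) = some (pvUpdMax (pvFoldMax zs) y) := by
      simp [pvFoldMax, List.foldl_append]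
    constructor
    · rw [hstep]; intro h; exact absurd h (by simp)
    intro m1 m2o h
    rw [hstep] at h
    cases hz : pvFoldMax zs with
    | none =>
      have hzs : zs = [] := ih.1 hz
      subst hzs
      rw [hz] at h
      unfold pvUpdMax at h
      obtain ⟨rfl, rfl⟩ : y = m1 ∧ (none : Option Int) = m2o := by
        simpa [Prod.ext_iff] using h
      refine ⟨by simp, by simp, by simp, by simp⟩
    | some e =>
      obtain ⟨n1, n2⟩ := e
      obtain ⟨hmem, hmax, hallnone, hallsome⟩ := ih.2 n1 n2 hz
      rw [hz] at h
      unfold pvUpdMax at h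
      dsimp only at h
      split_ifs at h with h1 h2
      · obtain ⟨rfl, rfl⟩ : y = m1 ∧ (some n1 : Option Int) = m2o := by
          simpa [Prod.ext_iff] using h
        refine ⟨by simp, ?_, by simp, ?_⟩
        · intro z hz'
          rcases List.mem_append.mp hz' with hz' | hz'
          · exact le_trans (hmax z hz') (le_of_lt h1)
          · simp at hz'; omega
        · intro m2 hm2
          obtain rfl : n1 = m2 := by simpa using hm2
          refine ⟨by simp [hmem], h1, ?_⟩
          intro z hz' hne
          rcases List.mem_append.mp hz' with hz' | hz'
          · exact hmax z hz'
          · simp at hz'; omega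
      · obtain ⟨h1', hlt⟩ := h2
        obtain ⟨rfl, rfl⟩ : n1 = m1 ∧ (some y : Option Int) = m2o := by
          simpa [Prod.ext_iff] using h
        refine ⟨by simp [hmem], ?_, by simp, ?_⟩
        · intro z hz'
          rcases List.mem_append.mp hz' with hz' | hz'
          · exact hmax z hz'
          · simp at hz'; omega
        · intro m2 hm2
          obtain rfl : y = m2 := by simpa using hm2
          refine ⟨by simp, h1', ?_⟩
          intro z hz' hne
          rcases List.mem_append.mp hz' with hz' | hz'
          · cases hn2 : n2 with
            | none => exact absurd (hallnone hn2 z hz') hne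
            | some w =>
              have hyw : w < y := by simpa [pvGtOpt, hn2] using hlt
              have := (hallsome w hn2).2.2 z hz' hne
              omega
          · simp at hz'; omega
      · obtain ⟨rfl, rfl⟩ : n1 = m1 ∧ n2 = m2o := by
          simpa [Prod.ext_iff] using h
        refine ⟨by simp [hmem], ?_, ?_, ?_⟩
        · intro z hz'
          rcases List.mem_append.mp hz' with hz' | hz'
          · exact hmax z hz'
          · simp at hz'; omega
        · intro hn z hz'
          rcases List.mem_append.mp hz' with hz' | hz'
          · exact hallnone hn z hz'
          · subst hn
            have : ¬ (y < n1 ∧ pvGtOpt y none = true) := h2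
            simp [pvGtOpt] at this
            simp at hz'; omega
        · intro m2 hm2
          obtain ⟨hm2mem, hm2lt, hm2max⟩ := hallsome m2 hm2
          refine ⟨by simp [hm2mem], hm2lt, ?_⟩
          intro z hz' hne
          rcases List.mem_append.mp hz' with hz' | hz'
          · exact hm2max z hz' hne
          · simp at hz'; subst hz'
            subst hm2
            have hny : z < n1 := by omega
            have : ¬ pvGtOpt z (some m2) = true := by
              intro hc; exact h2 ⟨hny, hc⟩
            simp [pvGtOpt] at this
            omega

lemma okMin_iff (t_all : List (Int × Int)) (x v : Int) :
    pvOkMin ((t_all.foldl pvStepMin PySem.Dict.empty).get? x) v = true ↔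
      (((t_all.filter (fun q => decide (q.1 = x ∧ q.2 ≠ v))).map (·.2)) ≠ [] ∧
        v ≤ (PySem.List.min? ((t_all.filter (fun q => decide (q.1 = x ∧ q.2 ≠ v))).map (·.2)) (fun y => y)).getD 0) := by
  have hget : (t_all.foldl pvStepMin PySem.Dict.empty).get? x
      = pvFoldMin ((t_all.filter (fun q => decide (q.1 = x))).map (·.2)) := by
    have h := get?_foldl_stepMin t_all PySem.Dict.empty x
    rwa [PySem.Dict.get?_empty] at h
  have hys' : ((t_all.filter (fun q => decide (q.1 = x ∧ q.2 ≠ v))).map (·.2))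
      = ((t_all.filter (fun q => decide (q.1 = x))).map (·.2)).filter (fun y => decide (y ≠ v)) := by
    rw [List.filter_map, List.filter_filter]
    congr 1
    apply List.filter_congr
    intro q _
    by_cases h1 : q.1 = x <;> by_cases h2 : q.2 = v <;> simp [h1, h2, Function.comp]
  rw [hys', hget]
  set ys := (t_all.filter (fun q => decide (q.1 = x))).map (·.2) with hysdef
  obtain ⟨hnone, hsome⟩ := pvFoldMin_spec ys
  cases he : pvFoldMin ys with
  | none =>
    have h0 : ys = [] := hnone he
    simp [pvOkMin, h0]
  | some e =>
    obtain ⟨m1, m2o⟩ := e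
    obtain ⟨hmem, hmin, hallnone, hallsome⟩ := hsome m1 m2o he
    set l' := ys.filter (fun y => decide (y ≠ v)) with hl'
    constructor
    · intro hok
      have hok' : v < m1 ∨ (v = m1 ∧ m2o.isSome = true) := by
        simpa [pvOkMin] using hok
      have hw : ∃ w, w ∈ l' := by
        rcases hok' with h | ⟨heq, hiso⟩
        · exact ⟨m1, List.mem_filter.mpr ⟨hmem, by simp; omega⟩⟩
        · obtain ⟨m2, hm2⟩ := Option.isSome_iff_exists.mp hiso
          obtain ⟨hm2mem, hm2gt, _⟩ := hallsome m2 hm2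
          exact ⟨m2, List.mem_filter.mpr ⟨hm2mem, by simp; omega⟩⟩
      obtain ⟨w, hwmem⟩ := hw
      have hne : l' ≠ [] := List.ne_nil_of_mem hwmem
      cases hmq : PySem.List.min? l' (fun y => y) with
      | none => exact absurd ((PySem.List.min?_eq_none_iff _ _).mp hmq) hne
      | some m =>
        have hmys : m ∈ ys := (List.mem_filter.mp (PySem.List.min?_mem hmq)).1
        have h1 : m1 ≤ m := hmin m hmys
        have h2 : v ≤ m1 := by rcases hok' with h | ⟨heq, _⟩ <;> omega
        refine ⟨hne, ?_⟩
        simpa using le_trans h2 h1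
    · rintro ⟨hne, hle⟩
      cases hmq : PySem.List.min? l' (fun y => y) with
      | none => exact absurd ((PySem.List.min?_eq_none_iff _ _).mp hmq) hne
      | some m =>
        rw [hmq] at hle
        simp at hle
        have hvm1 : v ≤ m1 := by
          by_contra hlt
          push_neg at hlt
          have hm1f : m1 ∈ l' := List.mem_filter.mpr ⟨hmem, by simp; omega⟩
          have hmm := PySem.List.min?_isMin hmq m1 hm1f
          simp at hmm
          omega
        rcases eq_or_lt_of_le hvm1 with heq | hlt
        · cases hm2 : m2o with
          | none =>
            have hempty : l' = [] := by
              rw [hl', List.filter_eq_nil_iff]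
              intro y hy
              simp [hallnone hm2 y hy, heq]
            exact absurd hempty hne
          | some m2 => simp [pvOkMin, heq]
        · simp [pvOkMin, hlt]

lemma okMax_iff (fo_all : List (Int × Int)) (x v : Int) :
    pvOkMax ((fo_all.foldl pvStepMax PySem.Dict.empty).get? x) v = true ↔
      (((fo_all.filter (fun q => decide (q.1 = x ∧ q.2 ≠ v))).map (·.2)) ≠ [] ∧
        (PySem.List.max? ((fo_all.filter (fun q => decide (q.1 = x ∧ q.2 ≠ v))).map (·.2)) (fun y => y)).getD 0 ≤ v) := by
  have hget : (fo_all.foldl pvStepMax PySem.Dict.empty).get? x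
      = pvFoldMax ((fo_all.filter (fun q => decide (q.1 = x))).map (·.2)) := by
    have h := get?_foldl_stepMax fo_all PySem.Dict.empty x
    rwa [PySem.Dict.get?_empty] at h
  have hys' : ((fo_all.filter (fun q => decide (q.1 = x ∧ q.2 ≠ v))).map (·.2))
      = ((fo_all.filter (fun q => decide (q.1 = x))).map (·.2)).filter (fun y => decide (y ≠ v)) := by
    rw [List.filter_map, List.filter_filter]
    congr 1
    apply List.filter_congr
    intro q _
    by_cases h1 : q.1 = x <;> by_cases h2 : q.2 = v <;> simp [h1, h2, Function.comp]
  rw [hys', hget]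
  set ys := (fo_all.filter (fun q => decide (q.1 = x))).map (·.2) with hysdef
  obtain ⟨hnone, hsome⟩ := pvFoldMax_spec ys
  cases he : pvFoldMax ys with
  | none =>
    have h0 : ys = [] := hnone he
    simp [pvOkMax, h0]
  | some e =>
    obtain ⟨m1, m2o⟩ := e
    obtain ⟨hmem, hmax, hallnone, hallsome⟩ := hsome m1 m2o he
    set l' := ys.filter (fun y => decide (y ≠ v)) with hl'
    constructor
    · intro hok
      have hok' : m1 < v ∨ (v = m1 ∧ m2o.isSome = true) := by
        simpa [pvOkMax] using hok
      have hw : ∃ w, w ∈ l' := by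
        rcases hok' with h | ⟨heq, hiso⟩
        · exact ⟨m1, List.mem_filter.mpr ⟨hmem, by simp; omega⟩⟩
        · obtain ⟨m2, hm2⟩ := Option.isSome_iff_exists.mp hiso
          obtain ⟨hm2mem, hm2lt, _⟩ := hallsome m2 hm2
          exact ⟨m2, List.mem_filter.mpr ⟨hm2mem, by simp; omega⟩⟩
      obtain ⟨w, hwmem⟩ := hw
      have hne : l' ≠ [] := List.ne_nil_of_mem hwmem
      cases hmq : PySem.List.max? l' (fun y => y) with
      | none => exact absurd ((PySem.List.max?_eq_none_iff _ _).mp hmq) hne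
      | some m =>
        have hmys : m ∈ ys := (List.mem_filter.mp (PySem.List.max?_mem hmq)).1
        have h1 : m ≤ m1 := hmax m hmys
        have h2 : m1 ≤ v := by rcases hok' with h | ⟨heq, _⟩ <;> omega
        refine ⟨hne, ?_⟩
        simpa using le_trans h1 h2
    · rintro ⟨hne, hle⟩
      cases hmq : PySem.List.max? l' (fun y => y) with
      | none => exact absurd ((PySem.List.max?_eq_none_iff _ _).mp hmq) hne
      | some m =>
        rw [hmq] at hle
        simp at hle
        have hvm1 : m1 ≤ v := by
          by_contra hlt
          push_neg at hlt
          have hm1f : m1 ∈ l' := List.mem_filter.mpr ⟨hmem, by simp; omega⟩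
          have hmm := PySem.List.max?_isMax hmq m1 hm1f
          simp at hmm
          omega
        rcases eq_or_lt_of_le hvm1 with heq | hlt
        · cases hm2 : m2o with
          | none =>
            have hempty : l' = [] := by
              rw [hl', List.filter_eq_nil_iff]
              intro y hy
              simp [hallnone hm2 y hy, heq]
            exact absurd hempty hne
          | some m2 => simp [pvOkMax, heq]
        · simp [pvOkMax, hlt]

-- ===== VERDICT (by name: the statement is the Claim_ definition above) =====
theorem find_distances_part2_spec : Claim_equal_find_distances_part2 := by
  intro f s t fo t_all fo_all _hdom
  unfold Spec_find_distances_part2 find_distances_part2 find_distances_part2_alt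
  simp only [foldl_flatMap_pairs]
  have h1 : f.foldl (fun max_area a => t.foldl (fun max_area b =>
      let c1 := ((a, b).1.1, (a, b).2.2)
      let all_relevant_tmp := t_all.foldl (fun acc i1 =>
        if i1.1 = c1.1 ∧ i1.2 ≠ c1.2 then acc ++ [i1.2] else acc) ([] : List Int)
      if all_relevant_tmp ≠ [] then
        if c1.2 ≤ (PySem.List.min? all_relevant_tmp (fun y => y)).getD 0 then
          let x := |(a, b).1.1 - (a, b).2.1| + 1
          let y := |(a, b).1.2 - (a, b).2.2| + 1
          let area := x * y
          if max_area < area then area else max_area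
        else max_area
      else max_area) max_area) 0
      = f.foldl (fun best a => t.foldl (fun best b =>
          if pvOkMin ((t_all.foldl pvStepMin PySem.Dict.empty).get? a.1) b.2 then
            let area := (|a.1 - b.1| + 1) * (|a.2 - b.2| + 1)
            if best < area then area else best
          else best) best) 0 := by
    apply PySem.List.foldl_congr_mem
    intro acc a _
    apply PySem.List.foldl_congr_mem
    intro acc2 b _
    dsimp only
    rw [PySem.List.foldl_append_ite (fun i1 : Int × Int => i1.1 = a.1 ∧ i1.2 ≠ b.2)
      (fun i1 => i1.2) t_all []]
    simp only [List.nil_append]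
    by_cases hok : pvOkMin ((t_all.foldl pvStepMin PySem.Dict.empty).get? a.1) b.2 = true
    · obtain ⟨hne, hle⟩ := (okMin_iff t_all a.1 b.2).mp hok
      simp only [if_pos hok, if_pos hne, if_pos hle]
    · rw [if_neg hok]
      split_ifs with hne hle <;>
        first
        | rfl
        | exact absurd ((okMin_iff t_all a.1 b.2).mpr ⟨hne, hle⟩) hok
  rw [h1]
  apply PySem.List.foldl_congr_mem
  intro acc a _
  apply PySem.List.foldl_congr_mem
  intro acc2 b _
  dsimp only
  rw [PySem.List.foldl_append_ite (fun i1 : Int × Int => i1.1 = a.1 ∧ i1.2 ≠ b.2)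
    (fun i1 => i1.2) fo_all []]
  simp only [List.nil_append]
  by_cases hok : pvOkMax ((fo_all.foldl pvStepMax PySem.Dict.empty).get? a.1) b.2 = true
  · obtain ⟨hne, hle⟩ := (okMax_iff fo_all a.1 b.2).mp hok
    simp only [if_pos hok, if_pos hne, if_pos hle]
  · rw [if_neg hok]
    split_ifs with hne hle <;>
      first
      | rfl
      | exact absurd ((okMax_iff fo_all a.1 b.2).mpr ⟨hne, hle⟩) hok
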